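-- pv_equiv track=rewrite | github.com/yoogangee/Coding_Test | 프로그래머스/lv1/17681. ［1차］ 비밀지도/［1차］ 비밀지도.py | solution
-- ===== SOURCE A (Python) =====
-- def solution(n, arr1, arr2):
--     answer = []
--     for i in range(n):
--         arr1Wall = format(arr1[i], 'b').zfill(n)
--         arr2Wall = format(arr2[i], 'b').zfill(n)
--
--         Wall = ""
--         for j in range(n):
--             if arr1Wall[j] == '1' or arr2Wall[j] == '1':
--                 Wall += '#'
--             else:
--                 Wall += ' '
--
--         answer.append(Wall)
--
--     return answer
-- ===== SOURCE B (Python) =====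
-- def render_row(n, a, b):
--     # Stamp the walls of each map onto a blank row buffer.
--     row = [' '] * n
--     for wall in (format(a, 'b').zfill(n), format(b, 'b').zfill(n)):
--         for j, c in enumerate(wall[:n]):
--             if c == '1':
--                 row[j] = '#'
--     return ''.join(row)
--
--
-- def solution(n, arr1, arr2):
--     return [render_row(n, arr1[i], arr2[i]) for i in range(n)]
-- ===== Notes on version B (the rewrite author's own statement) =====
-- stated objective: alternative
-- what changed: Instead of A's paired character-by-character comparison of the two bit strings that builds each row left to right, B starts from a blank row buffer and stamps each map's walls onto it separately (one overlay pass per map, writing '#' at the '1' positions), then joins the buffer.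
import Mathlib
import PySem

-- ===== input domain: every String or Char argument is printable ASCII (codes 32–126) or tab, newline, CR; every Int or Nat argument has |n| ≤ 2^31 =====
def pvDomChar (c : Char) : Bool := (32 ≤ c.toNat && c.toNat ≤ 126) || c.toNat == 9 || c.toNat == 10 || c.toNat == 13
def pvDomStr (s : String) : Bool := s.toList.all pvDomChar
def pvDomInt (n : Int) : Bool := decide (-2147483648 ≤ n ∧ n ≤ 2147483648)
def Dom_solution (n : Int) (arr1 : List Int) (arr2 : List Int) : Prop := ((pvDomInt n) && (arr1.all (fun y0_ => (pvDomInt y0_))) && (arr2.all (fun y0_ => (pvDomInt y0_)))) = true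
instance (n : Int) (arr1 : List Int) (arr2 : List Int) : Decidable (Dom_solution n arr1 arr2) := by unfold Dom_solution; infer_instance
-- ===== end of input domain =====

-- B renders each row by stamping each map's '1' positions onto a blank row buffer
-- (one overlay pass per map) instead of A's paired character-by-character comparison;
-- objective: alternative decomposition, same asymptotic cost.

-- ===== PORT A =====
def solution (n : Int) (arr1 : List Int) (arr2 : List Int) : List String :=
  (PySem.List.pyRange 0 n 1).foldl (fun answer i =>
    let arr1Wall := PySem.Chars.zfill (PySem.Int.toBinChars (PySem.List.pyGetD arr1 i 0)) n
    let arr2Wall := PySem.Chars.zfill (PySem.Int.toBinChars (PySem.List.pyGetD arr2 i 0)) n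
    let wall := (PySem.List.pyRange 0 n 1).foldl (fun w j =>
      if PySem.List.pyGetD arr1Wall j ' ' = '1' ∨ PySem.List.pyGetD arr2Wall j ' ' = '1'
      then w ++ ['#'] else w ++ [' ']) ([] : List Char)
    answer ++ [String.mk wall]) []

-- ===== PORT B =====
-- render_row: blank buffer [' ']*n, then for each wall stamp '#' at the '1' positions of wall[:n]
def renderRow (n : Int) (a : Int) (b : Int) : String :=
  String.mk
    (([PySem.Chars.zfill (PySem.Int.toBinChars a) n,
       PySem.Chars.zfill (PySem.Int.toBinChars b) n]).foldl
      (fun row wall =>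
        (PySem.List.enumerate (PySem.List.slice wall none (some n)) 0).foldl
          (fun row jc => if jc.2 = '1' then PySem.List.pySetD row jc.1 '#' else row) row)
      (List.replicate n.toNat ' '))

def solution_alt (n : Int) (arr1 : List Int) (arr2 : List Int) : List String :=
  (PySem.List.pyRange 0 n 1).map (fun i =>
    renderRow n (PySem.List.pyGetD arr1 i 0) (PySem.List.pyGetD arr2 i 0))

-- ===== PRECONDITION & SPEC =====
-- Pre_ excludes exactly the inputs where A raises IndexError (arr1[i] or arr2[i] with i < n out of range).
def Pre_solution (n : Int) (arr1 : List Int) (arr2 : List Int) : Prop :=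
  n ≤ (arr1.length : Int) ∧ n ≤ (arr2.length : Int)
instance (n : Int) (arr1 : List Int) (arr2 : List Int) : Decidable (Pre_solution n arr1 arr2) := by unfold Pre_solution; infer_instance
def pvWitness_solution : Int × List Int × List Int := (2, [1, 2], [2, 1])

def Spec_solution (n : Int) (arr1 : List Int) (arr2 : List Int) (out : List String) : Prop := out = solution_alt n arr1 arr2
instance (n : Int) (arr1 : List Int) (arr2 : List Int) (out : List String) : Decidable (Spec_solution n arr1 arr2 out) := by unfold Spec_solution; infer_instance

-- ===== CLAIM (what is proved, stated in full; the proofs are below) =====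
def Claim_equal_solution : Prop := ∀ (n : Int) (arr1 : List Int) (arr2 : List Int), Dom_solution n arr1 arr2 → Pre_solution n arr1 arr2 → Spec_solution n arr1 arr2 (solution n arr1 arr2)

-- ===== LEMMAS AND PROOFS =====

-- the stamping pass of one wall, as B's port performs it
def stamp (row : List Char) (w : List Char) (k : Int) : List Char :=
  (PySem.List.enumerate w k).foldl
    (fun row jc => if jc.2 = '1' then PySem.List.pySetD row jc.1 '#' else row) row

lemma stamp_length : ∀ (w row : List Char) (k : Int), (stamp row w k).length = row.length := by
  intro w
  induction w with
  | nil => intro row k; simp [stamp, PySem.List.enumerate_nil]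
  | cons c rest ih =>
    intro row k
    simp only [stamp, PySem.List.enumerate_cons, List.foldl_cons]
    rw [show ((PySem.List.enumerate rest (k+1)).foldl
        (fun row jc => if jc.2 = '1' then PySem.List.pySetD row jc.1 '#' else row)
        (if c = '1' then PySem.List.pySetD row k '#' else row))
      = stamp (if c = '1' then PySem.List.pySetD row k '#' else row) rest (k+1) from rfl]
    rw [ih]
    split <;> simp

lemma stamp_getD : ∀ (w : List Char) (k : Nat) (row : List Char) (j : Nat),
    k + w.length ≤ row.length →
    (stamp row w (k : Int)).getD j ' '
      = if k ≤ j ∧ j - k < w.length ∧ w[j - k]? = some '1' then '#' else row.getD j ' ' := by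
  intro w
  induction w with
  | nil =>
    intro k row j _
    simp [stamp, PySem.List.enumerate_nil]
  | cons c rest ih =>
    intro k row j hle
    simp only [List.length_cons] at hle
    have hkrow : k < row.length := by omega
    simp only [stamp, PySem.List.enumerate_cons, List.foldl_cons]
    have hcast : ((k : Int) + 1) = ((k + 1 : Nat) : Int) := by push_cast; ring
    rw [hcast]
    set row' := (if c = '1' then PySem.List.pySetD row (k : Int) '#' else row) with hrow'
    have hlen' : row'.length = row.length := by
      rw [hrow']; split <;> simp
    rw [show ((PySem.List.enumerate rest ((k+1 : Nat) : Int)).foldl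
        (fun row jc => if jc.2 = '1' then PySem.List.pySetD row jc.1 '#' else row) row')
      = stamp row' rest ((k+1 : Nat) : Int) from rfl]
    rw [ih (k+1) row' j (by omega)]
    have hrow'getD : row'.getD j ' '
        = if j = k ∧ c = '1' then '#' else row.getD j ' ' := by
      rw [hrow']
      by_cases hc : c = '1'
      · simp only [hc, if_true, PySem.List.pySetD_natCast]
        by_cases hjk : j = k
        · subst hjk
          simp [List.getD, hkrow]
        · simp [List.getD, List.getElem?_set_ne (by omega : k ≠ j), hjk]
      · simp [hc]
    by_cases hjk : j = k
    · subst hjk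
      rw [if_neg (fun h => absurd h.1 (by omega))]
      rw [hrow'getD]
      simp only [List.getElem?_cons_zero, Nat.sub_self]
      by_cases hc : c = '1'
      · simp [hc]
      · rw [if_neg (by simp [hc]), if_neg (by simp [hc])]
    · by_cases hlt : j < k
      · rw [if_neg (fun h => absurd h.1 (by omega)),
            if_neg (fun h => absurd h.1 (by omega)),
            hrow'getD, if_neg (by simp [hjk])]
      · -- j > k
        have hj1 : j - k = (j - (k+1)) + 1 := by omega
        have hcond : (k+1 ≤ j ∧ j - (k+1) < rest.length ∧ rest[j - (k+1)]? = some '1')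
            ↔ (k ≤ j ∧ j - k < (c :: rest).length ∧ (c :: rest)[j - k]? = some '1') := by
          rw [hj1, List.getElem?_cons_succ, List.length_cons]
          constructor <;> intro h <;> exact ⟨by omega, by omega, h.2.2⟩
        rw [if_congr hcond rfl rfl, hrow'getD]
        simp [hjk]

-- the per-row equality: A's paired comparison loop = B's blank-buffer stamping
lemma row_eq (n : Int) (hn : 0 < n) (a b : Int) :
    String.mk ((PySem.List.pyRange 0 n 1).foldl (fun w j =>
        if PySem.List.pyGetD (PySem.Chars.zfill (PySem.Int.toBinChars a) n) j ' ' = '1'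
            ∨ PySem.List.pyGetD (PySem.Chars.zfill (PySem.Int.toBinChars b) n) j ' ' = '1'
        then w ++ ['#'] else w ++ [' ']) ([] : List Char))
      = renderRow n a b := by
  set s := PySem.Chars.zfill (PySem.Int.toBinChars a) n with hs
  set t := PySem.Chars.zfill (PySem.Int.toBinChars b) n with ht
  have hslen : n.toNat ≤ s.length := by rw [hs, PySem.Chars.length_zfill]; omega
  have htlen : n.toNat ≤ t.length := by rw [ht, PySem.Chars.length_zfill]; omega
  have hbody : (fun (w : List Char) (j : Int) =>
      if PySem.List.pyGetD s j ' ' = '1' ∨ PySem.List.pyGetD t j ' ' = '1'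
      then w ++ ['#'] else w ++ [' '])
      = fun w j => w ++ [if PySem.List.pyGetD s j ' ' = '1' ∨ PySem.List.pyGetD t j ' ' = '1'
        then '#' else ' '] := by
    funext w j; split_ifs <;> rfl
  rw [hbody, PySem.List.foldl_append_singleton_eq_map, List.nil_append]
  unfold renderRow
  rw [← hs, ← ht]
  congr 1
  have hslice_s : PySem.List.slice s none (some n) = s.take n.toNat :=
    PySem.List.slice_to s (by omega)
  have hslice_t : PySem.List.slice t none (some n) = t.take n.toNat :=
    PySem.List.slice_to t (by omega)
  have hstamp : ∀ (r w : List Char), (PySem.List.enumerate w 0).foldl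
      (fun row jc => if jc.2 = '1' then PySem.List.pySetD row jc.1 '#' else row) r
      = stamp r w ((0 : Nat) : Int) := by
    intro r w; simp [stamp]
  simp only [List.foldl_cons, List.foldl_nil, hslice_s, hslice_t, hstamp]
  have hlen_ss : (s.take n.toNat).length = n.toNat := by simp; omega
  have hlen_tt : (t.take n.toNat).length = n.toNat := by simp; omega
  have hlen1 : (stamp (List.replicate n.toNat ' ') (s.take n.toNat) ((0:Nat):Int)).length = n.toNat := by
    rw [stamp_length]; simp
  apply List.ext_getElem
  · simp [PySem.List.length_pyRange_one, stamp_length]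
  · intro j h1 h2
    have hjn : j < n.toNat := by simpa [PySem.List.length_pyRange_one] using h1
    rw [List.getElem_map, PySem.List.getElem_pyRange_one 0 n j
      (by simpa [PySem.List.length_pyRange_one] using hjn)]
    simp only [zero_add]
    rw [show (stamp (stamp (List.replicate n.toNat ' ') (s.take n.toNat) ((0:Nat):Int))
        (t.take n.toNat) ((0:Nat):Int))[j]'h2
      = (stamp (stamp (List.replicate n.toNat ' ') (s.take n.toNat) ((0:Nat):Int))
        (t.take n.toNat) ((0:Nat):Int)).getD j ' '
      from (List.getD_eq_getElem _ ' ' (by omega)).symm]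
    rw [stamp_getD (t.take n.toNat) 0 _ j (by rw [stamp_length]; simp)]
    rw [stamp_getD (s.take n.toNat) 0 _ j (by simp)]
    have hget_s : PySem.List.pyGetD s (j : Int) ' ' = s.getD j ' ' := PySem.List.pyGetD_natCast s j ' '
    have hget_t : PySem.List.pyGetD t (j : Int) ' ' = t.getD j ' ' := PySem.List.pyGetD_natCast t j ' '
    have htake_s : (s.take n.toNat)[j - 0]? = s[j]? := by
      simp [hjn]
    have htake_t : (t.take n.toNat)[j - 0]? = t[j]? := by
      simp [hjn]
    have hsj : s.getD j ' ' = '1' ↔ s[j]? = some '1' := by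
      rw [List.getD_eq_getElem _ _ (by omega), List.getElem?_eq_getElem (by omega : j < s.length)]
      simp
    have htj : t.getD j ' ' = '1' ↔ t[j]? = some '1' := by
      rw [List.getD_eq_getElem _ _ (by omega), List.getElem?_eq_getElem (by omega : j < t.length)]
      simp
    have hrepl : (List.replicate n.toNat ' ').getD j ' ' = ' ' := by
      simp [List.getD, hjn]
    rw [hget_s, hget_t, htake_s, htake_t, hrepl, hlen_tt, hlen_ss]
    simp only [Nat.sub_zero, Nat.zero_le, true_and, hsj, htj]
    by_cases hS : s[j]? = some '1' <;> by_cases hT : t[j]? = some '1' <;>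
      simp [hS, hT, hjn]

-- ===== VERDICT (by name: the statement is the Claim_ definition above) =====
theorem solution_spec : Claim_equal_solution := by
  intro n arr1 arr2 _hdom _hpre
  unfold Spec_solution solution solution_alt
  by_cases hn : n ≤ 0
  · rw [PySem.List.pyRange_one_eq_nil hn]
    rfl
  · replace hn : 0 < n := by omega
    rw [show (fun (answer : List String) (i : Int) =>
        let arr1Wall := PySem.Chars.zfill (PySem.Int.toBinChars (PySem.List.pyGetD arr1 i 0)) n
        let arr2Wall := PySem.Chars.zfill (PySem.Int.toBinChars (PySem.List.pyGetD arr2 i 0)) n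
        let wall := (PySem.List.pyRange 0 n 1).foldl (fun w j =>
          if PySem.List.pyGetD arr1Wall j ' ' = '1' ∨ PySem.List.pyGetD arr2Wall j ' ' = '1'
          then w ++ ['#'] else w ++ [' ']) ([] : List Char)
        answer ++ [String.mk wall])
      = fun answer i => answer ++ [String.mk ((PySem.List.pyRange 0 n 1).foldl (fun w j =>
          if PySem.List.pyGetD (PySem.Chars.zfill (PySem.Int.toBinChars (PySem.List.pyGetD arr1 i 0)) n) j ' ' = '1'
            ∨ PySem.List.pyGetD (PySem.Chars.zfill (PySem.Int.toBinChars (PySem.List.pyGetD arr2 i 0)) n) j ' ' = '1'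
          then w ++ ['#'] else w ++ [' ']) ([] : List Char))] from rfl]
    rw [PySem.List.foldl_append_singleton_eq_map, List.nil_append]
    exact List.map_congr_left (fun i _ => row_eq n hn _ _)
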